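-- pv_equiv track=rewrite | github.com/Smici2/Delta-sakk | App/web/web.py | atalakito
-- ===== SOURCE A (Python) =====
-- def atalakito(data):
-- 	adatok = {
-- 		"r" : "images/dr.png",
-- 		"n" : "images/dn.png",
-- 		"b" : "images/db.png",
-- 		"q" : "images/dq.png",
-- 		"k" : "images/dk.png",
-- 		"p" : "images/dp.png",
--
-- 		"R" : "images/wr.png",
-- 		"N" : "images/wn.png",
-- 		"B" : "images/wb.png",
-- 		"Q" : "images/wq.png",
-- 		"K" : "images/wk.png",
-- 		"P" : "images/wp.png",
--
-- 		"*" : "images/blank.png"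
-- 	}
-- 	lista = []
-- 	for x in data:
-- 		lista.append(adatok[x])
--
-- 	return lista
-- ===== SOURCE B (Python) =====
-- PIECES = "pnbrqk"
--
-- def atalakito(data):
--     lista = []
--     for x in data:
--         if x == "*":
--             lista.append("images/blank.png")
--         elif x.lower() in PIECES:
--             lista.append("images/" + ("d" if x.islower() else "w") + x.lower() + ".png")
--         else:
--             raise KeyError(x)
--     return lista
-- ===== Notes on version B (the rewrite author's own statement) =====
-- stated objective: idiomatic
-- what changed: Replaces the 13-entry literal lookup table by computing each path from the character itself: colour from the letter's case, piece from its lowercased letter, with a small valid-piece set guarding unknown characters.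
import Mathlib
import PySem

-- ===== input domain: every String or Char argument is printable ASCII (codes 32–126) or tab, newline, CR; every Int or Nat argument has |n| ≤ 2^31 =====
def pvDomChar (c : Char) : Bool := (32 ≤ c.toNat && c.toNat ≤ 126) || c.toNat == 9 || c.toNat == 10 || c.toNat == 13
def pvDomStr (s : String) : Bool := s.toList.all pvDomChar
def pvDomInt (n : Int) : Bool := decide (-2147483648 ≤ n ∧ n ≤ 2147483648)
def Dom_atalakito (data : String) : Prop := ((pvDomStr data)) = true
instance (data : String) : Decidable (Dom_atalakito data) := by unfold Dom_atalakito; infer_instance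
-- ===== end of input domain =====

-- ===== PORT A =====
-- B changes: paths are computed from the character (case = colour, lowercased letter = piece)
-- instead of a 13-entry lookup table; idiomatic, same cost.
def adatok_atalakito : PySem.Dict Char String :=
  PySem.Dict.ofList [
    ('r', "images/dr.png"), ('n', "images/dn.png"), ('b', "images/db.png"),
    ('q', "images/dq.png"), ('k', "images/dk.png"), ('p', "images/dp.png"),
    ('R', "images/wr.png"), ('N', "images/wn.png"), ('B', "images/wb.png"),
    ('Q', "images/wq.png"), ('K', "images/wk.png"), ('P', "images/wp.png"),
    ('*', "images/blank.png")]

-- adatok[x] raises KeyError for unknown x: excluded by Pre_; getD "" stands for the never-taken branch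
def atalakito (data : String) : List String :=
  data.toList.foldl (fun lista x => lista ++ [(adatok_atalakito.get? x).getD ""]) []

-- ===== PORT B =====
def pieces_atalakito : List Char := "pnbrqk".toList

def stepB_atalakito (x : Char) : List String :=
  if x = '*' then ["images/blank.png"]
  else if x.toLower ∈ pieces_atalakito then
    ["images/" ++ (if x.isLower then "d" else "w") ++ String.ofList [x.toLower] ++ ".png"]
  else []  -- Python raises KeyError here; excluded by Pre_

def atalakito_alt (data : String) : List String :=
  data.toList.foldl (fun lista x => lista ++ stepB_atalakito x) []

-- ===== PRECONDITION & SPEC =====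
-- Pre_ excludes exactly the strings containing a character outside A's table, on which A raises KeyError.
def Pre_atalakito (data : String) : Prop :=
  (data.toList.all (fun x => x ∈ (['r','n','b','q','k','p','R','N','B','Q','K','P','*'] : List Char))) = true
instance (data : String) : Decidable (Pre_atalakito data) := by unfold Pre_atalakito; infer_instance
def pvWitness_atalakito : String := "k*"

def Spec_atalakito (data : String) (out : List String) : Prop := out = atalakito_alt data
instance (data : String) (out : List String) : Decidable (Spec_atalakito data out) := by unfold Spec_atalakito; infer_instance

-- ===== CLAIM (what is proved, stated in full; the proofs are below) =====
def Claim_equal_atalakito : Prop := ∀ (data : String), Dom_atalakito data → Pre_atalakito data → Spec_atalakito data (atalakito data)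

-- ===== LEMMAS AND PROOFS =====
theorem step_agree_atalakito (x : Char)
    (hx : x ∈ (['r','n','b','q','k','p','R','N','B','Q','K','P','*'] : List Char)) :
    [(adatok_atalakito.get? x).getD ""] = stepB_atalakito x := by
  fin_cases hx <;> decide

theorem foldl_agree_atalakito (l : List Char)
    (h : ∀ x ∈ l, x ∈ (['r','n','b','q','k','p','R','N','B','Q','K','P','*'] : List Char)) :
    ∀ acc : List String,
      l.foldl (fun lista x => lista ++ [(adatok_atalakito.get? x).getD ""]) acc
        = l.foldl (fun lista x => lista ++ stepB_atalakito x) acc := by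
  induction l with
  | nil => intro acc; rfl
  | cons x xs ih =>
      intro acc
      simp only [List.foldl_cons]
      rw [step_agree_atalakito x (h x (List.mem_cons_self ..))]
      exact ih (fun y hy => h y (List.mem_cons_of_mem _ hy)) _

-- ===== VERDICT (by name: the statement is the Claim_ definition above) =====
theorem atalakito_spec : Claim_equal_atalakito := by
  intro data _ hpre
  unfold Pre_atalakito at hpre
  rw [List.all_eq_true] at hpre
  unfold Spec_atalakito atalakito atalakito_alt
  exact foldl_agree_atalakito data.toList
    (fun x hx => by simpa using hpre x hx) []
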